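-- pv_equiv track=rewrite | github.com/EubiWan/Aoc2023 | Day2/task1.py | spliting_hairs
-- ===== SOURCE A (Python) =====
-- def spliting_hairs(newline):
--     data = []
--     newlist = newline.split('; ')
--
--     for ele in newlist:
--         temp = ele.split(', ')
--
--         for ment in temp:
--             data.append(ment.split(' '))
--
--     return data
-- ===== SOURCE B (Python) =====
-- def spliting_hairs(newline):
--     # one flat left-to-right scan: cut on '; ' or ', ' alike, then word-split each token
--     tokens = []
--     cur = []
--     i = 0
--     n = len(newline)
--     while i < n:
--         two = newline[i:i + 2]
--         if two == '; ' or two == ', ':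
--             tokens.append(''.join(cur))
--             cur = []
--             i += 2
--         else:
--             cur.append(newline[i])
--             i += 1
--     tokens.append(''.join(cur))
--     return [tok.split(' ') for tok in tokens]
-- ===== Notes on version B (the rewrite author's own statement) =====
-- stated objective: alternative
-- what changed: Replaces the nested semicolon-split-then-comma-split loops by a single left-to-right scan that cuts on either two-character delimiter in one flat tokenization pass, followed by one word-split per token.
import Mathlib
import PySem

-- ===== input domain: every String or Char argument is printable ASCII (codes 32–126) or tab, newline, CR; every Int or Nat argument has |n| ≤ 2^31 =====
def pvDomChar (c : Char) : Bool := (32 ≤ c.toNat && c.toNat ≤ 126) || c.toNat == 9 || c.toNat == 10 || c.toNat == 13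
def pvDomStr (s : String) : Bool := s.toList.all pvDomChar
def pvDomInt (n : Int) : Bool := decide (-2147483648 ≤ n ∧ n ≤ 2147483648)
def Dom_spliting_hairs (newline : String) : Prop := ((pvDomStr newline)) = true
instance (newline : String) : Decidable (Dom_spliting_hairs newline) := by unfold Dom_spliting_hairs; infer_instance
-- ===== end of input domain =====

-- B replaces A's nested semicolon-split-then-comma-split loops by a single flat left-to-right scan
-- that cuts on either two-character delimiter, then word-splits each token (alternative algorithm).


-- ===== PORT A =====
-- literal transliteration of A: split on '; ', per piece split on ', ', append each word-split
def spliting_hairs (newline : String) : List (List String) :=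
  let newlist := (PySem.Chars.splitOn newline.toList [';', ' ']).map String.ofList
  newlist.foldl (fun data ele =>
    let temp := (PySem.Chars.splitOn ele.toList [',', ' ']).map String.ofList
    temp.foldl (fun data ment =>
      data ++ [(PySem.Chars.splitOn ment.toList [' ']).map String.ofList]) data) []

-- ===== PORT B =====
-- B's while loop: fuel = chars left + 1; cur is the reversed current token, acc the reversed token list
def pvAltGo : Nat → List Char → List Char → List (List Char) → List (List Char)
  | 0, l, cur, acc => ((cur.reverse ++ l) :: acc).reverse
  | _ + 1, [], cur, acc => (cur.reverse :: acc).reverse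
  | fuel + 1, c :: rest, cur, acc =>
    if [';', ' '].isPrefixOf (c :: rest) || [',', ' '].isPrefixOf (c :: rest) then
      pvAltGo fuel ((c :: rest).drop 2) [] (cur.reverse :: acc)
    else
      pvAltGo fuel rest (c :: cur) acc

def spliting_hairs_alt (newline : String) : List (List String) :=
  let tokens := pvAltGo (newline.toList.length + 1) newline.toList [] []
  tokens.map (fun tok => (PySem.Chars.splitOn tok [' ']).map String.ofList)

-- ===== PRECONDITION & SPEC =====
def Spec_spliting_hairs (newline : String) (out : List (List String)) : Prop := out = spliting_hairs_alt newline
instance (newline : String) (out : List (List String)) : Decidable (Spec_spliting_hairs newline out) := by unfold Spec_spliting_hairs; infer_instance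

-- ===== CLAIM (what is proved, stated in full; the proofs are below) =====
def Claim_equal_spliting_hairs : Prop := ∀ (newline : String), Dom_spliting_hairs newline → Spec_spliting_hairs newline (spliting_hairs newline)

-- ===== LEMMAS AND PROOFS =====

-- clean structural form of PySem.Chars.splitOn for a separator of length ≥ 2
def pvCSplit (sep : List Char) : List Char → List (List Char)
  | [] => [[]]
  | c :: rest =>
    if h : sep.isPrefixOf (c :: rest) = true ∧ 2 ≤ sep.length then
      [] :: pvCSplit sep ((c :: rest).drop sep.length)
    else
      (pvCSplit sep rest).modifyHead (c :: ·)
termination_by l => l.length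
decreasing_by
  · have := (List.isPrefixOf_iff_prefix.mp h.1).length_le
    simp at this ⊢
    omega
  · simp

-- clean structural form of B's scanner
def pvCAlt : List Char → List (List Char)
  | [] => [[]]
  | c :: rest =>
    if [';', ' '].isPrefixOf (c :: rest) || [',', ' '].isPrefixOf (c :: rest) then
      [] :: pvCAlt ((c :: rest).drop 2)
    else
      (pvCAlt rest).modifyHead (c :: ·)
termination_by l => l.length
decreasing_by
  · simp
  · simp

theorem pvCSplit_ne_nil (sep l) : pvCSplit sep l ≠ [] := by
  induction l using pvCSplit.induct sep with
  | case1 => simp [pvCSplit]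
  | case2 c rest h ih => rw [pvCSplit, dif_pos h]; simp
  | case3 c rest h ih =>
    rw [pvCSplit, dif_neg h]
    cases hA : pvCSplit sep rest with
    | nil => exact absurd hA ih
    | cons a t => simp

theorem pvCAlt_ne_nil (l) : pvCAlt l ≠ [] := by
  induction l using pvCAlt.induct with
  | case1 => simp [pvCAlt]
  | case2 c rest h ih => simp [pvCAlt, h]
  | case3 c rest h ih =>
    simp only [pvCAlt, if_neg h]
    cases hA : pvCAlt rest with
    | nil => exact absurd hA ih
    | cons a t => simp

theorem pvGo_spec (sep : List Char) (hs : 2 ≤ sep.length) :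
    ∀ n l cur acc, List.length l < n →
      PySem.Chars.splitOn.go sep n l cur acc
        = acc.reverse ++ (pvCSplit sep l).modifyHead (cur.reverse ++ ·) := by
  intro n
  induction n with
  | zero => intro l cur acc h; omega
  | succ n ih =>
    intro l cur acc h
    cases l with
    | nil =>
      simp [PySem.Chars.splitOn.go, pvCSplit]
    | cons c rest =>
      by_cases hp : sep.isPrefixOf (c :: rest)
      · have hlen : sep.length ≤ rest.length + 1 := (List.isPrefixOf_iff_prefix.mp hp).length_le
        have hsep2 : List.length (List.drop sep.length (c :: rest)) < n := by
          simp at h ⊢; omega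
        rw [PySem.Chars.splitOn.go, if_pos hp, ih _ _ _ hsep2]
        rw [pvCSplit, dif_pos (And.intro hp hs)]
        cases hA : pvCSplit sep (List.drop sep.length (c :: rest)) with
        | nil => exact absurd hA (pvCSplit_ne_nil _ _)
        | cons a t => simp
      · rw [PySem.Chars.splitOn.go, if_neg hp]
        have : rest.length < n := by simp at h; omega
        rw [ih _ _ _ this]
        rw [pvCSplit, dif_neg (fun hx => hp hx.1)]
        cases hA : pvCSplit sep rest with
        | nil => exact absurd hA (pvCSplit_ne_nil _ _)
        | cons a t => simp

theorem pvSplitOn_eq (sep : List Char) (hs : 2 ≤ sep.length) (l : List Char) :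
    PySem.Chars.splitOn l sep = pvCSplit sep l := by
  rw [PySem.Chars.splitOn, pvGo_spec sep hs _ _ _ _ (by omega)]
  cases hA : pvCSplit sep l with
  | nil => exact absurd hA (pvCSplit_ne_nil _ _)
  | cons a t => simp

theorem pvAltGo_spec :
    ∀ n l cur acc, List.length l < n →
      pvAltGo n l cur acc = acc.reverse ++ (pvCAlt l).modifyHead (cur.reverse ++ ·) := by
  intro n
  induction n with
  | zero => intro l cur acc h; omega
  | succ n ih =>
    intro l cur acc h
    cases l with
    | nil => simp [pvAltGo, pvCAlt]
    | cons c rest =>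
      by_cases hp : ([';', ' '].isPrefixOf (c :: rest) || [',', ' '].isPrefixOf (c :: rest)) = true
      · rw [pvAltGo, if_pos hp]
        have : List.length (List.drop 2 (c :: rest)) < n := by simp at h ⊢; omega
        rw [ih _ _ _ this]
        simp only [pvCAlt, if_pos hp]
        cases hA : pvCAlt (List.drop 2 (c :: rest)) with
        | nil => exact absurd hA (pvCAlt_ne_nil _)
        | cons a t => simp
      · rw [pvAltGo, if_neg hp]
        have : rest.length < n := by simp at h; omega
        rw [ih _ _ _ this]
        simp only [pvCAlt, if_neg hp]
        cases hA : pvCAlt rest with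
        | nil => exact absurd hA (pvCAlt_ne_nil _)
        | cons a t => simp

-- the head of pvCSplit sep l is a prefix of l
theorem pvCSplit_head_prefix (sep : List Char) :
    ∀ l h t, pvCSplit sep l = h :: t → h <+: l := by
  intro l
  induction l using pvCSplit.induct sep with
  | case1 =>
    intro h t he
    rw [pvCSplit] at he
    cases he; simp
  | case2 c rest hc ih =>
    intro h t he
    rw [pvCSplit, dif_pos hc] at he
    cases he; simp
  | case3 c rest hc ih =>
    intro h t he
    rw [pvCSplit, dif_neg hc] at he
    cases hA : pvCSplit sep rest with
    | nil => exact absurd hA (pvCSplit_ne_nil _ _)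
    | cons a t' =>
      rw [hA] at he
      simp only [List.modifyHead] at he
      cases he
      exact List.cons_prefix_cons.mpr ⟨rfl, ih _ _ hA⟩

-- core: nested split '; ' then ', ' = one alternation scan
theorem pvMain : ∀ l : List Char,
    (pvCSplit [';', ' '] l).flatMap (pvCSplit [',', ' ']) = pvCAlt l := by
  intro l
  induction hn : l.length using Nat.strong_induction_on generalizing l with
  | _ n ih =>
  subst hn
  match l with
  | [] => simp [pvCSplit, pvCAlt]
  | c :: rest =>
    by_cases hS : [';', ' '].isPrefixOf (c :: rest)
    · -- cut on '; ' in both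
      have hcond : ([';', ' '].isPrefixOf (c :: rest) || [',', ' '].isPrefixOf (c :: rest)) = true := by
        simp [hS]
      have hpre := List.isPrefixOf_iff_prefix.mp hS
      have hlen : 2 ≤ (c :: rest).length := hpre.length_le
      rw [show pvCSplit [';', ' '] (c :: rest) = [] :: pvCSplit [';', ' '] ((c :: rest).drop 2) by
            rw [pvCSplit, dif_pos (And.intro hS (by simp))]
            rfl]
      rw [show pvCAlt (c :: rest) = [] :: pvCAlt ((c :: rest).drop 2) by
            rw [pvCAlt, if_pos hcond]]
      simp only [List.flatMap_cons]
      rw [show pvCSplit [',', ' '] [] = [[]] by rw [pvCSplit]]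
      rw [ih ((c :: rest).drop 2).length (by simp only [List.length_drop, List.length_cons]; omega) _ rfl]
      simp
    · by_cases hC : [',', ' '].isPrefixOf (c :: rest)
      · -- cut on ', ' : B cuts now; A's first '; '-piece starts with ', '
        have hpre := List.isPrefixOf_iff_prefix.mp hC
        obtain ⟨u, hu⟩ := hpre
        have hc : c = ',' := by cases hu; rfl
        have hrest : rest = ' ' :: u := by cases hu; rfl
        have hS2 : ¬ [';', ' '].isPrefixOf rest := by
          rw [hrest]; intro hx
          have := List.isPrefixOf_iff_prefix.mp hx
          rcases this with ⟨v, hv⟩; cases hv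
        have e1 : pvCSplit [';', ' '] (c :: rest)
            = ((pvCSplit [';', ' '] u).modifyHead (' ' :: ·)).modifyHead (c :: ·) := by
          rw [pvCSplit, dif_neg (by exact fun hx => hS hx.1)]
          congr 1
          rw [hrest, pvCSplit, dif_neg (by exact fun hx => hS2 (by rw [hrest]; exact hx.1))]
        cases hA : pvCSplit [';', ' '] u with
        | nil => exact absurd hA (pvCSplit_ne_nil _ _)
        | cons a t =>
          have e2 : pvCSplit [';', ' '] (c :: rest) = (c :: ' ' :: a) :: t := by
            rw [e1, hA]; rfl
          rw [e2]
          simp only [List.flatMap_cons]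
          have e3 : pvCSplit [',', ' '] (c :: ' ' :: a) = [] :: pvCSplit [',', ' '] a := by
            rw [hc, pvCSplit, dif_pos (And.intro (by simp [List.isPrefixOf]) (by simp))]
            rfl
          rw [e3]
          have hcond : ([';', ' '].isPrefixOf (c :: rest) || [',', ' '].isPrefixOf (c :: rest)) = true := by
            simp [hC]
          rw [show pvCAlt (c :: rest) = [] :: pvCAlt ((c :: rest).drop 2) by
                rw [pvCAlt, if_pos hcond]]
          have hdrop : (c :: rest).drop 2 = u := by rw [hrest]; rfl
          rw [hdrop, ← ih u.length (by rw [hrest]; simp) u rfl, hA]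
          simp
      · -- no delimiter at this position in either version
        have hcond : ([';', ' '].isPrefixOf (c :: rest) || [',', ' '].isPrefixOf (c :: rest)) = false := by
          simp [hS, hC]
        have e1 : pvCSplit [';', ' '] (c :: rest) = (pvCSplit [';', ' '] rest).modifyHead (c :: ·) := by
          rw [pvCSplit, dif_neg (by exact fun hx => hS hx.1)]
        cases hA : pvCSplit [';', ' '] rest with
        | nil => exact absurd hA (pvCSplit_ne_nil _ _)
        | cons a t =>
          have hap : a <+: rest := pvCSplit_head_prefix _ _ _ _ hA
          have hCa : ¬ [',', ' '].isPrefixOf (c :: a) = true := by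
            intro hx
            obtain ⟨v, hv⟩ := List.isPrefixOf_iff_prefix.mp hx
            obtain ⟨w, hw⟩ := hap
            apply hC
            cases hv
            rw [← hw]
            simp [List.isPrefixOf]
          have e2 : pvCSplit [',', ' '] (c :: a) = (pvCSplit [',', ' '] a).modifyHead (c :: ·) := by
            rw [pvCSplit, dif_neg (by exact fun hx => hCa hx.1)]
          rw [e1, hA]
          simp only [List.modifyHead, List.flatMap_cons]
          rw [e2]
          rw [show pvCAlt (c :: rest) = (pvCAlt rest).modifyHead (c :: ·) by
                rw [pvCAlt, if_neg (by simp [hcond])]]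
          rw [← ih rest.length (by simp) rest rfl, hA]
          simp only [List.flatMap_cons]
          cases hB : pvCSplit [',', ' '] a with
          | nil => exact absurd hB (pvCSplit_ne_nil _ _)
          | cons b t' => simp

-- A's nested append loops are a flatMap of a map
theorem pvA_flatMap (newline : String) :
    spliting_hairs newline
      = (PySem.Chars.splitOn newline.toList [';', ' ']).flatMap
          (fun e => (PySem.Chars.splitOn e [',', ' ']).map
            (fun m => (PySem.Chars.splitOn m [' ']).map String.ofList)) := by
  unfold spliting_hairs
  simp only []
  rw [List.foldl_map]
  have inner : ∀ (temp : List String) (data : List (List String)),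
      temp.foldl (fun data ment =>
        data ++ [(PySem.Chars.splitOn ment.toList [' ']).map String.ofList]) data
      = data ++ temp.map (fun ment => (PySem.Chars.splitOn ment.toList [' ']).map String.ofList) := by
    intro temp
    induction temp with
    | nil => simp
    | cons x xs ih => intro data; simp [ih]
  have outer : ∀ (pieces : List (List Char)) (data : List (List String)),
      pieces.foldl (fun data ele =>
        ((PySem.Chars.splitOn (String.ofList ele).toList [',', ' ']).map String.ofList).foldl
          (fun data ment =>
            data ++ [(PySem.Chars.splitOn ment.toList [' ']).map String.ofList]) data) data
      = data ++ pieces.flatMap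
          (fun e => (PySem.Chars.splitOn e [',', ' ']).map
            (fun m => (PySem.Chars.splitOn m [' ']).map String.ofList)) := by
    intro pieces
    induction pieces with
    | nil => simp
    | cons x xs ih =>
      intro data
      rw [List.foldl_cons, inner, ih]
      simp [List.map_map, Function.comp_def]
  rw [outer]
  simp

-- ===== VERDICT (by name: the statement is the Claim_ definition above) =====
theorem spliting_hairs_spec : Claim_equal_spliting_hairs := by
  intro newline _
  unfold Spec_spliting_hairs
  rw [pvA_flatMap]
  unfold spliting_hairs_alt
  simp only []
  rw [pvAltGo_spec _ _ _ _ (by omega)]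
  cases hA : pvCAlt newline.toList with
  | nil => exact absurd hA (pvCAlt_ne_nil _)
  | cons a t =>
    rw [pvSplitOn_eq [';', ' '] (by simp)]
    have : ∀ e, PySem.Chars.splitOn e [',', ' '] = pvCSplit [',', ' '] e := fun e =>
      pvSplitOn_eq [',', ' '] (by simp) e
    simp only [this]
    rw [← List.map_flatMap, pvMain, hA]
    simp
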